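-- pv_equiv track=rewrite | github.com/parasiitism/AlgoDaily | codeforces/1760e/main.py | solve
-- ===== SOURCE A (Python) =====
-- def solve(nums):
--     original = count_inversions(nums)
--     flip_first_zero = 0
--     flip_last_one = 0
--
--     first_zero = -1
--     last_one = -1
--     for i in range(len(nums)):
--         x = nums[i]
--         if x == 0:
--             if first_zero == -1:
--                 first_zero = i
--         else:
--             last_one = i
--     if first_zero != -1:
--         clone = nums[:]
--         clone[first_zero] = 1
--         flip_first_zero = count_inversions(clone)
--     if last_one != -1:
--         clone = nums[:]
--         clone[last_one] = 0
--         flip_last_one = count_inversions(clone)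
--     return max(original, flip_first_zero, flip_last_one)
--
-- def count_inversions(nums):
--     ones = 0
--     res = 0
--     for x in nums:
--         if x == 0:
--             res += ones
--         else:
--             ones += 1
--     return res
-- ===== SOURCE B (Python) =====
-- def solve(nums):
--     # One pass: count inversions while recording (ones,zeros) before the first
--     # zero and before the last nonzero; derive flip candidates by delta.
--     original = 0
--     ones = 0
--     zeros = 0
--     fz = None
--     lo = None
--     for x in nums:
--         if x == 0:
--             original += ones
--             if fz is None:
--                 fz = (ones, zeros)
--             zeros += 1
--         else:
--             lo = (ones, zeros)
--             ones += 1
--     best = original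
--     if fz is not None:
--         ob, zb = fz
--         best = max(best, original + (zeros - zb - 1) - ob)
--     if lo is not None:
--         ob, zb = lo
--         best = max(best, original + ob - (zeros - zb))
--     return best
-- ===== Notes on version B (the rewrite author's own statement) =====
-- stated objective: faster
-- what changed: B replaces A's three separate inversion-counting passes over the list and its two clones with a single pass that records prefix ones/zeros statistics at the first zero and last nonzero, deriving each flip candidate by a closed-form delta.
import Mathlib
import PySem

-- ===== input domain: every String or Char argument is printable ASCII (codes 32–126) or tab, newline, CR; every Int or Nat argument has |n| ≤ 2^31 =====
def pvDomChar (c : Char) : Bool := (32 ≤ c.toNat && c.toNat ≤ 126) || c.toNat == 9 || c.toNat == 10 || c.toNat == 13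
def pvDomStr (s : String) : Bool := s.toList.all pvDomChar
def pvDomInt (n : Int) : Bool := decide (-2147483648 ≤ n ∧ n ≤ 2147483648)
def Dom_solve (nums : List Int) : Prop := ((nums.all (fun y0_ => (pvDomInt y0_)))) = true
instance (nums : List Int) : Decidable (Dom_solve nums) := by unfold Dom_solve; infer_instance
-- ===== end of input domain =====

-- B replaces A's three full inversion counts over cloned lists by one pass that
-- also records prefix statistics, deriving each flip candidate by a closed-form delta (objective: faster, single pass).

-- ===== PORT A =====
def ciStep (s : Int × Int) (x : Int) : Int × Int :=
  if x = 0 then (s.1, s.2 + s.1) else (s.1 + 1, s.2)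

def countInv (nums : List Int) : Int :=
  (nums.foldl ciStep (0, 0)).2

-- the index-finding for loop of A, as structural recursion over the list with the same state
def solveLoop (i fz lo : Int) : List Int → Int × Int
  | [] => (fz, lo)
  | x :: t =>
    if x = 0 then solveLoop (i + 1) (if fz = -1 then i else fz) lo t
    else solveLoop (i + 1) fz i t

def solve (nums : List Int) : Int :=
  let original := countInv nums
  let p := solveLoop 0 (-1) (-1) nums
  let flipFirstZero := if p.1 ≠ -1 then countInv (nums.set p.1.toNat 1) else 0
  let flipLastOne := if p.2 ≠ -1 then countInv (nums.set p.2.toNat 0) else 0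
  max original (max flipFirstZero flipLastOne)

-- ===== PORT B =====
-- state: (original, ones, zeros, fz, lo)
def altStep (s : Int × Int × Int × Option (Int × Int) × Option (Int × Int)) (x : Int) :
    Int × Int × Int × Option (Int × Int) × Option (Int × Int) :=
  match s with
  | (orig, ones, zeros, fz, lo) =>
    if x = 0 then
      (orig + ones, ones, zeros + 1, (if fz.isNone then some (ones, zeros) else fz), lo)
    else
      (orig, ones + 1, zeros, fz, some (ones, zeros))

def solve_alt (nums : List Int) : Int :=
  match nums.foldl altStep (0, 0, 0, none, none) with
  | (orig, _, zeros, fz, lo) =>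
    let best1 :=
      match fz with
      | some (ob, zb) => max orig (orig + (zeros - zb - 1) - ob)
      | none => orig
    match lo with
    | some (ob, zb) => max best1 (orig + ob - (zeros - zb))
    | none => best1

-- ===== PRECONDITION & SPEC =====
def Spec_solve (nums : List Int) (out : Int) : Prop := out = solve_alt nums
instance (nums : List Int) (out : Int) : Decidable (Spec_solve nums out) := by unfold Spec_solve; infer_instance

-- ===== CLAIM (what is proved, stated in full; the proofs are below) =====
def Claim_equal_solve : Prop := ∀ (nums : List Int), Dom_solve nums → Spec_solve nums (solve nums)

-- ===== LEMMAS AND PROOFS =====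

-- number of nonzero / zero entries
def cntO : List Int → Int
  | [] => 0
  | x :: t => (if x = 0 then 0 else 1) + cntO t

def cntZ : List Int → Int
  | [] => 0
  | x :: t => (if x = 0 then 1 else 0) + cntZ t

-- (ones, zeros) just before the first zero / the last nonzero, from a running state
def fzInfo (o z : Int) : List Int → Option (Int × Int)
  | [] => none
  | x :: t => if x = 0 then some (o, z) else fzInfo (o + 1) z t

def loInfo (o z : Int) : List Int → Option (Int × Int)
  | [] => none
  | x :: t =>
    if x = 0 then loInfo o (z + 1) t
    else match loInfo (o + 1) z t with
      | some p => some p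
      | none => some (o, z)

-- index of the first zero / last nonzero, -1 if absent
def fzIdx (i : Int) : List Int → Int
  | [] => -1
  | x :: t => if x = 0 then i else fzIdx (i + 1) t

def loIdx (i : Int) : List Int → Int
  | [] => -1
  | x :: t =>
    if x = 0 then loIdx (i + 1) t
    else (if loIdx (i + 1) t = -1 then i else loIdx (i + 1) t)

theorem ci_aux : ∀ (xs : List Int) (o r : Int),
    xs.foldl ciStep (o, r) = (o + cntO xs, r + o * cntZ xs + countInv xs) := by
  intro xs
  induction xs with
  | nil => intro o r; simp [cntO, cntZ, countInv]
  | cons x t ih =>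
    intro o r
    by_cases hx : x = 0
    · subst hx
      have h0 : countInv ((0:Int) :: t) = countInv t := by
        simp [countInv, List.foldl, ciStep]
      rw [show ((0:Int) :: t).foldl ciStep (o, r) = t.foldl ciStep (o, r + o) from by
        simp [List.foldl, ciStep], ih, h0]
      simp only [cntO, cntZ, reduceIte, Prod.mk.injEq]
      constructor <;> ring
    · have h1 : countInv (x :: t) = cntZ t + countInv t := by
        have hs : countInv (x :: t) = (t.foldl ciStep (1, 0)).2 := by
          simp [countInv, List.foldl, ciStep, hx]
        rw [hs, ih]
        show (0:Int) + 1 * cntZ t + countInv t = cntZ t + countInv t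
        ring
      rw [show (x :: t).foldl ciStep (o, r) = t.foldl ciStep (o + 1, r) from by
        simp [List.foldl, ciStep, hx], ih]
      simp only [cntO, cntZ, if_neg hx, h1, Prod.mk.injEq]
      constructor <;> ring

theorem countInv_cons_zero (t : List Int) : countInv ((0 : Int) :: t) = countInv t := by
  simp [countInv, List.foldl, ciStep]

theorem countInv_cons_ne (y : Int) (t : List Int) (hy : y ≠ 0) :
    countInv (y :: t) = cntZ t + countInv t := by
  have hs : countInv (y :: t) = (t.foldl ciStep (1, 0)).2 := by
    simp [countInv, List.foldl, ciStep, hy]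
  rw [hs, ci_aux]
  show (0:Int) + 1 * cntZ t + countInv t = cntZ t + countInv t
  ring

theorem countInv_append (l m : List Int) :
    countInv (l ++ m) = countInv l + cntO l * cntZ m + countInv m := by
  have h' : l.foldl ciStep (0, 0) = (cntO l, countInv l) := by
    rw [ci_aux]
    refine congrArg₂ Prod.mk (by ring) (by ring)
  have h2 : countInv (l ++ m) = (m.foldl ciStep (l.foldl ciStep (0, 0))).2 := by
    show ((l ++ m).foldl ciStep (0, 0)).2 = _
    rw [List.foldl_append]
  rw [h2, h', ci_aux]

theorem cntZ_append (l m : List Int) : cntZ (l ++ m) = cntZ l + cntZ m := by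
  induction l with
  | nil => simp [cntZ]
  | cons x t ih => simp [cntZ, ih]; ring

theorem cntZ_nonneg : ∀ xs : List Int, 0 ≤ cntZ xs := by
  intro xs; induction xs with
  | nil => simp [cntZ]
  | cons x t ih => simp only [cntZ]; split <;> omega

theorem countInv_nonneg : ∀ xs : List Int, 0 ≤ countInv xs := by
  intro xs; induction xs with
  | nil => simp [countInv]
  | cons x t ih =>
    by_cases hx : x = 0
    · rw [hx, countInv_cons_zero]; exact ih
    · rw [countInv_cons_ne x t hx]; have := cntZ_nonneg t; omega

theorem countInv_of_cntZ_zero : ∀ xs : List Int, cntZ xs = 0 → countInv xs = 0 := by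
  intro xs; induction xs with
  | nil => simp [countInv]
  | cons x t ih =>
    intro h
    by_cases hx : x = 0
    · exfalso; simp only [cntZ, if_pos hx] at h; have := cntZ_nonneg t; omega
    · simp only [cntZ, if_neg hx] at h
      have hz : cntZ t = 0 := by omega
      rw [countInv_cons_ne x t hx, hz, ih hz]; ring

theorem cntO_add_cntZ : ∀ xs : List Int, cntO xs + cntZ xs = (xs.length : Int) := by
  intro xs; induction xs with
  | nil => simp [cntO, cntZ]
  | cons x t ih => simp only [cntO, cntZ, List.length_cons]; split <;> push_cast <;> omega

theorem set_append_cons (l r : List Int) (y v : Int) :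
    (l ++ y :: r).set l.length v = l ++ v :: r := by
  induction l with
  | nil => simp
  | cons a t ih => simp [List.set, ih]

-- characterization of A's index loop
theorem solveLoop_eq : ∀ (xs : List Int) (i fz lo : Int), 0 ≤ i →
    solveLoop i fz lo xs =
      ((if fz = -1 then fzIdx i xs else fz),
       (if loIdx i xs = -1 then lo else loIdx i xs)) := by
  intro xs
  induction xs with
  | nil => intro i fz lo hi; simp [solveLoop, fzIdx, loIdx]
  | cons x t ih =>
    intro i fz lo hi
    by_cases hx : x = 0
    · simp only [solveLoop, fzIdx, loIdx, if_pos hx]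
      rw [ih (i + 1) _ _ (by omega)]
      by_cases hfz : fz = -1
      · simp [hfz]; omega
      · simp [hfz]
    · simp only [solveLoop, fzIdx, loIdx, if_neg hx]
      rw [ih (i + 1) _ _ (by omega)]
      by_cases hlo : loIdx (i + 1) t = -1
      · simp [hlo]; omega
      · simp [hlo]

-- characterization of B's fold
theorem alt_fold : ∀ (xs : List Int) (orig ones zeros : Int)
    (fz lo : Option (Int × Int)),
    xs.foldl altStep (orig, ones, zeros, fz, lo) =
      (orig + ones * cntZ xs + countInv xs, ones + cntO xs, zeros + cntZ xs,
       (if fz.isNone then fzInfo ones zeros xs else fz),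
       (match loInfo ones zeros xs with | some p => some p | none => lo)) := by
  intro xs
  induction xs with
  | nil => intro orig ones zeros fz lo; simp [cntO, cntZ, countInv, fzInfo, loInfo]
  | cons x t ih =>
    intro orig ones zeros fz lo
    by_cases hx : x = 0
    · subst hx
      rw [show List.foldl altStep (orig, ones, zeros, fz, lo) ((0:Int) :: t) =
            List.foldl altStep (orig + ones, ones, zeros + 1,
              (if fz.isNone then some (ones, zeros) else fz), lo) t from by
        simp [List.foldl, altStep]]
      rw [ih]
      simp only [cntO, cntZ, fzInfo, loInfo, reduceIte, countInv_cons_zero]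
      refine congrArg₂ Prod.mk (by ring) (congrArg₂ Prod.mk (by ring)
        (congrArg₂ Prod.mk (by ring) (congrArg₂ Prod.mk ?_ ?_)))
      · cases fz <;> simp
      · rfl
    · rw [show List.foldl altStep (orig, ones, zeros, fz, lo) (x :: t) =
            List.foldl altStep (orig, ones + 1, zeros, fz, some (ones, zeros)) t from by
        simp [List.foldl, altStep, hx]]
      rw [ih]
      simp only [cntO, cntZ, fzInfo, loInfo, if_neg hx, countInv_cons_ne x t hx]
      refine congrArg₂ Prod.mk (by ring) (congrArg₂ Prod.mk (by ring)
        (congrArg₂ Prod.mk (by ring) (congrArg₂ Prod.mk ?_ ?_)))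
      · cases fz <;> simp
      · cases hcall : loInfo (ones + 1) zeros t <;> simp [hcall]

-- first-zero decomposition
theorem fz_cases : ∀ (xs : List Int) (i : Int), 0 ≤ i →
    (fzIdx i xs = -1 ∧ (∀ o z, fzInfo o z xs = none)) ∨
    (∃ l r, xs = l ++ (0 : Int) :: r ∧ cntZ l = 0 ∧
      fzIdx i xs = i + l.length ∧ (∀ o z, fzInfo o z xs = some (o + l.length, z))) := by
  intro xs
  induction xs with
  | nil => intro i hi; left; exact ⟨rfl, fun o z => rfl⟩
  | cons x t ih =>
    intro i hi
    by_cases hx : x = 0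
    · right
      refine ⟨[], t, by simp [hx], by simp [cntZ], ?_, ?_⟩
      · simp [fzIdx, hx]
      · intro o z; simp [fzInfo, hx]
    · rcases ih (i + 1) (by omega) with ⟨h1, h2⟩ | ⟨l, r, hdecomp, hl, hidx, hinfo⟩
      · left
        refine ⟨by simp [fzIdx, hx, h1], fun o z => by simp [fzInfo, hx, h2]⟩
      · right
        refine ⟨x :: l, r, by simp [hdecomp], by simp [cntZ, hx, hl], ?_, ?_⟩
        · simp only [fzIdx, if_neg hx, hidx, List.length_cons]; push_cast; ring
        · intro o z
          simp only [fzInfo, if_neg hx, hinfo, List.length_cons]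
          push_cast; refine congrArg some (congrArg₂ Prod.mk (by ring) rfl)

-- last-one decomposition
theorem lo_cases : ∀ (xs : List Int) (i : Int), 0 ≤ i →
    (loIdx i xs = -1 ∧ (∀ o z, loInfo o z xs = none)) ∨
    (∃ l y r, xs = l ++ y :: r ∧ y ≠ 0 ∧
      loIdx i xs = i + l.length ∧
      (∀ o z, loInfo o z xs = some (o + cntO l, z + cntZ l))) := by
  intro xs
  induction xs with
  | nil => intro i hi; left; exact ⟨rfl, fun o z => rfl⟩
  | cons x t ih =>
    intro i hi
    by_cases hx : x = 0
    · rcases ih (i + 1) (by omega) with ⟨h1, h2⟩ | ⟨l, y, r, hdecomp, hy, hidx, hinfo⟩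
      · left
        refine ⟨by simp [loIdx, hx, h1], fun o z => by simp [loInfo, hx, h2]⟩
      · right
        refine ⟨x :: l, y, r, by simp [hdecomp], hy, ?_, ?_⟩
        · simp only [loIdx, if_pos hx, hidx, List.length_cons]; push_cast; ring
        · intro o z
          simp only [loInfo, if_pos hx, hinfo, cntO, cntZ, if_pos hx, List.length_cons]
          refine congrArg some (congrArg₂ Prod.mk (by ring) (by ring))
    · rcases ih (i + 1) (by omega) with ⟨h1, h2⟩ | ⟨l, y, r, hdecomp, hy, hidx, hinfo⟩
      · right
        refine ⟨[], x, t, by simp, hx, ?_, ?_⟩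
        · simp [loIdx, hx, h1]
        · intro o z; simp [loInfo, hx, h2 (o+1) z, cntO, cntZ]
      · right
        have hlen : (0:Int) ≤ (l.length : Int) := by positivity
        refine ⟨x :: l, y, r, by simp [hdecomp], hy, ?_, ?_⟩
        · have hne : loIdx (i + 1) t ≠ -1 := by omega
          simp only [loIdx, if_neg hx, hidx, if_neg (by omega : ¬ (i + 1 + (l.length:Int) = -1)), List.length_cons]
          push_cast; ring
        · intro o z
          simp only [loInfo, if_neg hx, hinfo, cntO, cntZ, if_neg hx]
          refine congrArg some (congrArg₂ Prod.mk (by ring) (by ring))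

-- value of A's two flip candidates in closed form
theorem flipfz_val (l r : List Int) (hl : cntZ l = 0) :
    countInv ((l ++ (0:Int) :: r).set l.length 1) =
      countInv (l ++ (0:Int) :: r) + (cntZ (l ++ (0:Int) :: r) - 1) - (l.length : Int) := by
  rw [set_append_cons]
  rw [countInv_append, countInv_append, cntZ_append, hl]
  rw [countInv_cons_zero, countInv_cons_ne 1 r (by norm_num)]
  have hz : cntZ ((0:Int) :: r) = 1 + cntZ r := by simp [cntZ]
  have hz1 : cntZ ((1:Int) :: r) = cntZ r := by simp [cntZ]
  have hO : cntO l = (l.length : Int) := by have := cntO_add_cntZ l; omega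
  rw [hz, hz1, hO, countInv_of_cntZ_zero l hl]
  ring

theorem fliplo_val (l r : List Int) (y : Int) (hy : y ≠ 0) :
    countInv ((l ++ y :: r).set l.length 0) =
      countInv (l ++ y :: r) + cntO l - (cntZ (l ++ y :: r) - cntZ l) := by
  rw [set_append_cons]
  rw [countInv_append, countInv_append, cntZ_append]
  rw [countInv_cons_zero, countInv_cons_ne y r hy]
  have hz : cntZ ((0:Int) :: r) = 1 + cntZ r := by simp [cntZ]
  have hzy : cntZ (y :: r) = cntZ r := by simp [cntZ, hy]
  rw [hz, hzy]
  ring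

theorem main_eq (nums : List Int) : solve nums = solve_alt nums := by
  have hA := solveLoop_eq nums 0 (-1) (-1) le_rfl
  have hB := alt_fold nums 0 0 0 none none
  have h0 := countInv_nonneg nums
  rcases fz_cases nums 0 le_rfl with ⟨hfzi, hfzn⟩ | ⟨l, r, hd, hl, hfzi, hfzn⟩ <;>
    rcases lo_cases nums 0 le_rfl with ⟨hloi, hlon⟩ | ⟨l', y', r', hd', hy', hloi, hlon⟩
  · -- no zero, no nonzero
    simp [solve, solve_alt, hA, hB, hfzi, hloi, hfzn, hlon]
    omega
  · -- no zero, last nonzero exists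
    have hv : countInv (nums.set l'.length 0) = countInv nums + cntO l' - (cntZ nums - cntZ l') := by
      rw [hd']; exact fliplo_val l' r' y' hy'
    have e' : ¬((l'.length : Int) = -1) := by omega
    simp [solve, solve_alt, hA, hB, hfzi, hloi, hfzn, hlon, e', hv]
    omega
  · -- first zero exists, no nonzero
    have hv : countInv (nums.set l.length 1) = countInv nums + (cntZ nums - 1) - l.length := by
      rw [hd]; exact flipfz_val l r hl
    have e : ¬((l.length : Int) = -1) := by omega
    simp [solve, solve_alt, hA, hB, hfzi, hloi, hfzn, hlon, e, hv]
    omega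
  · -- both exist
    have hv1 : countInv (nums.set l.length 1) = countInv nums + (cntZ nums - 1) - l.length := by
      rw [hd]; exact flipfz_val l r hl
    have hv2 : countInv (nums.set l'.length 0) = countInv nums + cntO l' - (cntZ nums - cntZ l') := by
      rw [hd']; exact fliplo_val l' r' y' hy'
    have e : ¬((l.length : Int) = -1) := by omega
    have e' : ¬((l'.length : Int) = -1) := by omega
    simp [solve, solve_alt, hA, hB, hfzi, hloi, hfzn, hlon, e, e', hv1, hv2]

-- ===== VERDICT (by name: the statement is the Claim_ definition above) =====
theorem solve_spec : Claim_equal_solve := by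
  intro nums _
  unfold Spec_solve
  exact main_eq nums
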